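-- pv_equiv track=rewrite | github.com/oxidane/tmuxomatic | windowgram/windowgram.py | direction_to_axiswithflag
-- ===== SOURCE A (Python) =====
-- valid_directions = [ # These directions are recognized, the list is ordered 0123 == TBRL || NSEW
--     [ "top", "t", "tp",     "north", "n",   "up", "u", "over", "above",     ],  # ix == 0 -> Vertical +
--     [ "bottom", "b", "bt",  "south", "s",   "down", "d", "under", "below",  ],  # ix == 1 -> Vertical -
--     [ "right", "r", "rt",   "east", "e"                                     ],  # ix == 2 -> Horizontal -
--     [ "left", "l", "lt",    "west", "w"                                     ],  # ix == 3 -> Horizontal +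
-- ]
--
-- def direction_to_axiswithflag(direction, inverse=False): # axis_as_vh, negate_flag | None, None
--     for ix, directions_ent in enumerate(valid_directions):
--         if True in [True if d.lower().strip() == direction.lower().strip() else False for d in directions_ent]:
--             if ix == 0: return "v", False ^ inverse  # Top
--             if ix == 1: return "v", True  ^ inverse  # Bottom
--             if ix == 2: return "h", True  ^ inverse  # Right
--             if ix == 3: return "h", False ^ inverse  # Left
--     return None, None
-- ===== SOURCE B (Python) =====
-- # Single flat ordered word list; one .index scan, then the group and both outputs
-- # are decoded arithmetically from the position (no per-group tables of results).
-- _WORDS = ("top", "t", "tp", "north", "n", "up", "u", "over", "above",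
--           "bottom", "b", "bt", "south", "s", "down", "d", "under", "below",
--           "right", "r", "rt", "east", "e",
--           "left", "l", "lt", "west", "w")
--
-- def direction_to_axiswithflag(direction, inverse=False):
--     key = direction.lower().strip()
--     try:
--         idx = _WORDS.index(key)
--     except ValueError:
--         return None, None
--     group = (idx >= 9) + (idx >= 18) + (idx >= 23)
--     return ("v" if group < 2 else "h"), (1 <= group <= 2) ^ inverse
-- ===== Notes on version B (the rewrite author's own statement) =====
-- stated objective: alternative
-- what changed: Replaces the nested per-group scan with hardcoded per-group returns by one flat ordered word list searched once with .index, after which the group and both outputs (axis and flag) are decoded arithmetically from the position via threshold comparisons.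
import Mathlib
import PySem

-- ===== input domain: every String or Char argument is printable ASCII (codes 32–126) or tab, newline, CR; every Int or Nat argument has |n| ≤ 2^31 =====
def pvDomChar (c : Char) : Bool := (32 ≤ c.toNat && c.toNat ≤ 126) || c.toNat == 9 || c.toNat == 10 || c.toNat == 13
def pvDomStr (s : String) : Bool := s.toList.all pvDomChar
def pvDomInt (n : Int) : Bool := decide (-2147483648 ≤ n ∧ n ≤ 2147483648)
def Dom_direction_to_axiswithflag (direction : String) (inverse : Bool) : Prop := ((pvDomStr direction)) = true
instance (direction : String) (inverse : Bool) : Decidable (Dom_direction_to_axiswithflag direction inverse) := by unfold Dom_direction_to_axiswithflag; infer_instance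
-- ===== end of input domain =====

-- B replaces A's nested per-group scan (with hardcoded per-group returns) by one flat
-- ordered word list searched once, the position being decoded arithmetically into both
-- outputs (objective: alternative).

-- ===== PORT A =====
def valid_directions : List (List String) :=
  [ ["top", "t", "tp", "north", "n", "up", "u", "over", "above"],
    ["bottom", "b", "bt", "south", "s", "down", "d", "under", "below"],
    ["right", "r", "rt", "east", "e"],
    ["left", "l", "lt", "west", "w"] ]

-- the 'for ix, directions_ent in enumerate(valid_directions)' loop of A
def dtafLoop (direction : String) (inverse : Bool) :
    List (Int × List String) → Option String × Option Bool
  | [] => (none, none)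
  | (ix, ent) :: rest =>
    if (ent.map (fun d =>
          if PySem.Str.strip (PySem.Str.lower d) == PySem.Str.strip (PySem.Str.lower direction)
          then true else false)).contains true then
      if ix == 0 then (some "v", some (xor false inverse))
      else if ix == 1 then (some "v", some (xor true inverse))
      else if ix == 2 then (some "h", some (xor true inverse))
      else if ix == 3 then (some "h", some (xor false inverse))
      else dtafLoop direction inverse rest
    else dtafLoop direction inverse rest

def direction_to_axiswithflag (direction : String) (inverse : Bool) : Option String × Option Bool :=
  dtafLoop direction inverse (PySem.List.enumerate valid_directions)

-- ===== PORT B =====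
def dirWords : List String :=
  ["top", "t", "tp", "north", "n", "up", "u", "over", "above",
   "bottom", "b", "bt", "south", "s", "down", "d", "under", "below",
   "right", "r", "rt", "east", "e",
   "left", "l", "lt", "west", "w"]

def direction_to_axiswithflag_alt (direction : String) (inverse : Bool) : Option String × Option Bool :=
  match PySem.List.index? dirWords (PySem.Str.strip (PySem.Str.lower direction)) with
  | none => (none, none)
  | some idx =>
      let group : Nat :=
        (if 9 ≤ idx then 1 else 0) + (if 18 ≤ idx then 1 else 0) + (if 23 ≤ idx then 1 else 0)
      ((if group < 2 then some "v" else some "h"),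
       some (xor (decide (1 ≤ group ∧ group ≤ 2)) inverse))

-- ===== PRECONDITION & SPEC =====
def Spec_direction_to_axiswithflag (direction : String) (inverse : Bool) (out : Option String × Option Bool) : Prop := out = direction_to_axiswithflag_alt direction inverse
instance (direction : String) (inverse : Bool) (out : Option String × Option Bool) : Decidable (Spec_direction_to_axiswithflag direction inverse out) := by unfold Spec_direction_to_axiswithflag; infer_instance

-- ===== CLAIM (what is proved, stated in full; the proofs are below) =====
def Claim_equal_direction_to_axiswithflag : Prop := ∀ (direction : String) (inverse : Bool), Dom_direction_to_axiswithflag direction inverse → Spec_direction_to_axiswithflag direction inverse (direction_to_axiswithflag direction inverse)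

-- ===== LEMMAS AND PROOFS =====

-- proof-side copy of A's loop taking the normalized key directly
def dtafLoopK (k : String) (inverse : Bool) :
    List (Int × List String) → Option String × Option Bool
  | [] => (none, none)
  | (ix, ent) :: rest =>
    if (ent.map (fun d =>
          if PySem.Str.strip (PySem.Str.lower d) == k then true else false)).contains true then
      if ix == 0 then (some "v", some (xor false inverse))
      else if ix == 1 then (some "v", some (xor true inverse))
      else if ix == 2 then (some "h", some (xor true inverse))
      else if ix == 3 then (some "h", some (xor false inverse))
      else dtafLoopK k inverse rest
    else dtafLoopK k inverse rest

-- proof-side copy of B's body taking the normalized key directly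
def altK (k : String) (inverse : Bool) : Option String × Option Bool :=
  match PySem.List.index? dirWords k with
  | none => (none, none)
  | some idx =>
      let group : Nat :=
        (if 9 ≤ idx then 1 else 0) + (if 18 ≤ idx then 1 else 0) + (if 23 ≤ idx then 1 else 0)
      ((if group < 2 then some "v" else some "h"),
       some (xor (decide (1 ≤ group ∧ group ≤ 2)) inverse))

theorem dtafLoop_eq_loopK (d : String) (inv : Bool) (l : List (Int × List String)) :
    dtafLoop d inv l = dtafLoopK (PySem.Str.strip (PySem.Str.lower d)) inv l := by
  induction l with
  | nil => rfl
  | cons p rest ih =>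
    obtain ⟨ix, ent⟩ := p
    simp only [dtafLoop, dtafLoopK, ih]

set_option maxRecDepth 8192 in
set_option maxHeartbeats 2000000 in
theorem bridge (k : String) (inv : Bool) :
    dtafLoopK k inv (PySem.List.enumerate valid_directions) = altK k inv := by
  by_cases hk : k ∈ dirWords
  · fin_cases hk <;> cases inv <;> decide
  · have hnone : PySem.List.index? dirWords k = none :=
      (PySem.List.index?_eq_none_iff dirWords k).mpr hk
    have halt : altK k inv = (none, none) := by
      simp only [altK, hnone]
    rw [halt]
    simp only [dirWords, List.mem_cons, not_or, List.not_mem_nil] at hk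
    obtain ⟨h1, h2, h3, h4, h5, h6, h7, h8, h9, h10, h11, h12, h13, h14,
            h15, h16, h17, h18, h19, h20, h21, h22, h23, h24, h25, h26, h27, h28, -⟩ := hk
    have n1 : PySem.Str.strip (PySem.Str.lower "top") = "top" := by decide
    have n2 : PySem.Str.strip (PySem.Str.lower "t") = "t" := by decide
    have n3 : PySem.Str.strip (PySem.Str.lower "tp") = "tp" := by decide
    have n4 : PySem.Str.strip (PySem.Str.lower "north") = "north" := by decide
    have n5 : PySem.Str.strip (PySem.Str.lower "n") = "n" := by decide
    have n6 : PySem.Str.strip (PySem.Str.lower "up") = "up" := by decide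
    have n7 : PySem.Str.strip (PySem.Str.lower "u") = "u" := by decide
    have n8 : PySem.Str.strip (PySem.Str.lower "over") = "over" := by decide
    have n9 : PySem.Str.strip (PySem.Str.lower "above") = "above" := by decide
    have n10 : PySem.Str.strip (PySem.Str.lower "bottom") = "bottom" := by decide
    have n11 : PySem.Str.strip (PySem.Str.lower "b") = "b" := by decide
    have n12 : PySem.Str.strip (PySem.Str.lower "bt") = "bt" := by decide
    have n13 : PySem.Str.strip (PySem.Str.lower "south") = "south" := by decide
    have n14 : PySem.Str.strip (PySem.Str.lower "s") = "s" := by decide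
    have n15 : PySem.Str.strip (PySem.Str.lower "down") = "down" := by decide
    have n16 : PySem.Str.strip (PySem.Str.lower "d") = "d" := by decide
    have n17 : PySem.Str.strip (PySem.Str.lower "under") = "under" := by decide
    have n18 : PySem.Str.strip (PySem.Str.lower "below") = "below" := by decide
    have n19 : PySem.Str.strip (PySem.Str.lower "right") = "right" := by decide
    have n20 : PySem.Str.strip (PySem.Str.lower "r") = "r" := by decide
    have n21 : PySem.Str.strip (PySem.Str.lower "rt") = "rt" := by decide
    have n22 : PySem.Str.strip (PySem.Str.lower "east") = "east" := by decide
    have n23 : PySem.Str.strip (PySem.Str.lower "e") = "e" := by decide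
    have n24 : PySem.Str.strip (PySem.Str.lower "left") = "left" := by decide
    have n25 : PySem.Str.strip (PySem.Str.lower "l") = "l" := by decide
    have n26 : PySem.Str.strip (PySem.Str.lower "lt") = "lt" := by decide
    have n27 : PySem.Str.strip (PySem.Str.lower "west") = "west" := by decide
    have n28 : PySem.Str.strip (PySem.Str.lower "w") = "w" := by decide
    have f1 : (("top":String) == k) = false := beq_eq_false_iff_ne.mpr (fun e => h1 e.symm)
    have f2 : (("t":String) == k) = false := beq_eq_false_iff_ne.mpr (fun e => h2 e.symm)
    have f3 : (("tp":String) == k) = false := beq_eq_false_iff_ne.mpr (fun e => h3 e.symm)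
    have f4 : (("north":String) == k) = false := beq_eq_false_iff_ne.mpr (fun e => h4 e.symm)
    have f5 : (("n":String) == k) = false := beq_eq_false_iff_ne.mpr (fun e => h5 e.symm)
    have f6 : (("up":String) == k) = false := beq_eq_false_iff_ne.mpr (fun e => h6 e.symm)
    have f7 : (("u":String) == k) = false := beq_eq_false_iff_ne.mpr (fun e => h7 e.symm)
    have f8 : (("over":String) == k) = false := beq_eq_false_iff_ne.mpr (fun e => h8 e.symm)
    have f9 : (("above":String) == k) = false := beq_eq_false_iff_ne.mpr (fun e => h9 e.symm)
    have f10 : (("bottom":String) == k) = false := beq_eq_false_iff_ne.mpr (fun e => h10 e.symm)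
    have f11 : (("b":String) == k) = false := beq_eq_false_iff_ne.mpr (fun e => h11 e.symm)
    have f12 : (("bt":String) == k) = false := beq_eq_false_iff_ne.mpr (fun e => h12 e.symm)
    have f13 : (("south":String) == k) = false := beq_eq_false_iff_ne.mpr (fun e => h13 e.symm)
    have f14 : (("s":String) == k) = false := beq_eq_false_iff_ne.mpr (fun e => h14 e.symm)
    have f15 : (("down":String) == k) = false := beq_eq_false_iff_ne.mpr (fun e => h15 e.symm)
    have f16 : (("d":String) == k) = false := beq_eq_false_iff_ne.mpr (fun e => h16 e.symm)
    have f17 : (("under":String) == k) = false := beq_eq_false_iff_ne.mpr (fun e => h17 e.symm)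
    have f18 : (("below":String) == k) = false := beq_eq_false_iff_ne.mpr (fun e => h18 e.symm)
    have f19 : (("right":String) == k) = false := beq_eq_false_iff_ne.mpr (fun e => h19 e.symm)
    have f20 : (("r":String) == k) = false := beq_eq_false_iff_ne.mpr (fun e => h20 e.symm)
    have f21 : (("rt":String) == k) = false := beq_eq_false_iff_ne.mpr (fun e => h21 e.symm)
    have f22 : (("east":String) == k) = false := beq_eq_false_iff_ne.mpr (fun e => h22 e.symm)
    have f23 : (("e":String) == k) = false := beq_eq_false_iff_ne.mpr (fun e => h23 e.symm)
    have f24 : (("left":String) == k) = false := beq_eq_false_iff_ne.mpr (fun e => h24 e.symm)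
    have f25 : (("l":String) == k) = false := beq_eq_false_iff_ne.mpr (fun e => h25 e.symm)
    have f26 : (("lt":String) == k) = false := beq_eq_false_iff_ne.mpr (fun e => h26 e.symm)
    have f27 : (("west":String) == k) = false := beq_eq_false_iff_ne.mpr (fun e => h27 e.symm)
    have f28 : (("w":String) == k) = false := beq_eq_false_iff_ne.mpr (fun e => h28 e.symm)
    simp only [valid_directions, PySem.List.enumerate_cons, PySem.List.enumerate_nil,
      dtafLoopK, List.map, n1, n2, n3, n4, n5, n6, n7, n8, n9, n10, n11, n12, n13, n14,
      n15, n16, n17, n18, n19, n20, n21, n22, n23, n24, n25, n26, n27, n28]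
    simp [f1, f2, f3, f4, f5, f6, f7, f8, f9, f10, f11, f12, f13, f14, f15, f16, f17,
      f18, f19, f20, f21, f22, f23, f24, f25, f26, f27, f28]

-- ===== VERDICT (by name: the statement is the Claim_ definition above) =====
theorem direction_to_axiswithflag_spec : Claim_equal_direction_to_axiswithflag := by
  intro d inv _
  show direction_to_axiswithflag d inv = direction_to_axiswithflag_alt d inv
  rw [direction_to_axiswithflag, dtafLoop_eq_loopK, bridge]
  simp only [altK, direction_to_axiswithflag_alt]
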